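-- pv_equiv track=rewrite | github.com/zinozino1/Algorithm_PS | 프로그래머스/LV2. 기능개발.py | solution
-- ===== SOURCE A (Python) =====
-- from collections import deque
--
-- def solution(progresses, speeds):
--
--     q = deque(progresses)
--     cnt = 0
--     idx = 0
--     res = []
--     timer = 1
--     while q:
--         if q[0] >= 100:
--             while q and q[0] >= 100:
--                 q.popleft()
--                 idx += 1
--                 cnt += 1
--         if cnt > 0:
--             res.append(cnt)
--             cnt = 0
--         for i in range(len(q)):
--             q[i] += speeds[idx+i]
--         timer += 1
--
--     return res
-- ===== SOURCE B (Python) =====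
-- def solution(progresses, speeds):
--     # O(n): completion day per task (ceil division), then group by running max of days.
--     res = []
--     cur = -1
--     cnt = 0
--     for i, p in enumerate(progresses):
--         d = 0 if p >= 100 else -((p - 100) // speeds[i])
--         if d > cur:
--             if cnt > 0:
--                 res.append(cnt)
--             cur = d
--             cnt = 1
--         else:
--             cnt += 1
--     if cnt > 0:
--         res.append(cnt)
--     return res
-- ===== Notes on version B (the rewrite author's own statement) =====
-- stated objective: alternative
-- what changed: Replaces the day-by-day queue simulation (incrementing every remaining task each day) with a single O(n) pass that computes each task's completion day by ceiling division and groups tasks by the running maximum of completion days (intended as the standard linear-pass solution; a timing run could not confirm a ratio because A timed out on the generated sizes).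
-- outside the precondition, e.g. on solution([0], [0]): A does not finish within the time limit, B raises ZeroDivisionError; on solution([100], [-1]): A returns [1], B returns [1]; on solution([100], []): A returns [1], B returns [1]
import Mathlib
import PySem

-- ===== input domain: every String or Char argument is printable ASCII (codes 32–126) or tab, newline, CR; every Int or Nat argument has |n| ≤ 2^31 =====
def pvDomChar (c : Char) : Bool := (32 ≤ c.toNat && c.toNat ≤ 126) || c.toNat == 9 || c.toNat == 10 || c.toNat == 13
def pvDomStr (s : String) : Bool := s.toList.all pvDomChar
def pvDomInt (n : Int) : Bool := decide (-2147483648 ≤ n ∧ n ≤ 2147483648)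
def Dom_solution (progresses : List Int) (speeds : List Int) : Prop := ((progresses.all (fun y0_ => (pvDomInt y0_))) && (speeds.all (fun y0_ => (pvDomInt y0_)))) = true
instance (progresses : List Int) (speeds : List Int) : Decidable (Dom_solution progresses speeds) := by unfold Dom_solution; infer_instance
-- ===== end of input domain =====

-- B replaces the day-by-day queue simulation with a single pass: each task's completion
-- day is computed by ceiling division and tasks are grouped by the running maximum of days.

-- ===== PORT A =====
-- inner `while q and q[0] >= 100` pop loop (the guarding `if q[0] >= 100` is subsumed):
-- returns the remaining queue and the number of popped tasks (= the increments of idx and cnt)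
def aPop : List Int → List Int × Nat
  | [] => ([], 0)
  | x :: xs => if 100 ≤ x then ((aPop xs).1, (aPop xs).2 + 1) else (x :: xs, 0)

-- one `while q:` iteration per fuel unit; the fuel is a bound on the number of iterations,
-- sufficient on every input admitted by Pre_solution (outside Pre_ the Python loops forever
-- or raises).  `speeds.getD (idx+i) 0` is Python's `speeds[idx+i]`: in range under Pre_.
def aStep (speeds : List Int) : Nat → List Int → Nat → List Int → List Int
  | 0, _, _, res => res
  | fuel + 1, q, idx, res =>
    if q.isEmpty then res
    else
      let idx' := idx + (aPop q).2
      let res' := if 0 < (aPop q).2 then res ++ [((aPop q).2 : Int)] else res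
      let q' := ((aPop q).1.zipIdx).map (fun t => t.1 + speeds.getD (idx' + t.2) 0)
      aStep speeds fuel q' idx' res'

def solution (progresses : List Int) (speeds : List Int) : List Int :=
  aStep speeds ((progresses.map (fun p => (100 - p).toNat)).sum + 2) progresses 0 []

-- ===== PORT B =====
-- `0 if p >= 100 else -((p - 100) // s)` : completion day of one task (ceiling division)
def dayOf (p s : Int) : Int := if 100 ≤ p then 0 else -(PySem.Int.floordiv (p - 100) s)

-- the single `for i, p in enumerate(progresses)` loop of Source B, state (cur, cnt, res)
def bGo (speeds : List Int) : List (Int × Nat) → Int → Int → List Int → List Int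
  | [], _, cnt, res => if 0 < cnt then res ++ [cnt] else res
  | (p, i) :: rest, cur, cnt, res =>
    let d := dayOf p (speeds.getD i 0)
    if cur < d then bGo speeds rest d 1 (if 0 < cnt then res ++ [cnt] else res)
    else bGo speeds rest cur (cnt + 1) res

def solution_alt (progresses : List Int) (speeds : List Int) : List Int :=
  bGo speeds progresses.zipIdx (-1) 0 []

-- ===== PRECONDITION & SPEC =====
-- Pre_ excludes inputs with a task that can never finish (speed ≤ 0 while progress < 100,
-- or a missing speed entry), where A loops forever or raises IndexError; on the corner
-- inputs of that region where A still returns (already-finished tasks with a negative,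
-- zero or missing speed) B happens to return the same value.
def Pre_solution (progresses : List Int) (speeds : List Int) : Prop :=
  progresses.length ≤ speeds.length ∧
  ∀ t ∈ progresses.zip speeds, 1 ≤ t.2 ∨ (100 ≤ t.1 ∧ 0 ≤ t.2)

instance (progresses : List Int) (speeds : List Int) : Decidable (Pre_solution progresses speeds) := by
  unfold Pre_solution; infer_instance

def pvWitness_solution : List Int × List Int := ([93, 30, 55], [1, 30, 5])

def Spec_solution (progresses : List Int) (speeds : List Int) (out : List Int) : Prop := out = solution_alt progresses speeds
instance (progresses : List Int) (speeds : List Int) (out : List Int) : Decidable (Spec_solution progresses speeds out) := by unfold Spec_solution; infer_instance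

-- ===== CLAIM (what is proved, stated in full; the proofs are below) =====
def Claim_equal_solution : Prop := ∀ (progresses : List Int) (speeds : List Int), Dom_solution progresses speeds → Pre_solution progresses speeds → Spec_solution progresses speeds (solution progresses speeds)

-- ===== LEMMAS AND PROOFS =====

-- a task pair admitted by Pre_
def okP (t : Int × Int) : Prop := 1 ≤ t.2 ∨ (100 ≤ t.1 ∧ 0 ≤ t.2)

-- list of completion days of the paired tasks
def days (ts : List (Int × Int)) : List Int := ts.map (fun t => dayOf t.1 t.2)

-- grouping a day list by its running maximum
def groups : List Int → List Int
  | [] => []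
  | d :: ds =>
    ((1 + (ds.takeWhile (fun x => decide (x ≤ d))).length : Int)) ::
      groups (ds.dropWhile (fun x => decide (x ≤ d)))
termination_by l => l.length
decreasing_by exact Nat.lt_succ_of_le (List.length_dropWhile_le _ _)

-- max completion day
def maxDay (ts : List (Int × Int)) : Int := (days ts).foldr max 0

lemma dayOf_bounds {p s : Int} (hp : ¬ 100 ≤ p) (hs : 1 ≤ s) :
    (dayOf p s - 1) * s < 100 - p ∧ 100 - p ≤ dayOf p s * s := by
  have hd : -(PySem.Int.floordiv (-(100 - p)) s) = dayOf p s := by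
    simp only [dayOf, if_neg hp]
    norm_num
  exact (PySem.Int.neg_floordiv_neg_eq_iff_of_pos (by omega)).mp hd

lemma dayOf_nonneg {p s : Int} (h : okP (p, s)) : 0 ≤ dayOf p s := by
  by_cases hp : 100 ≤ p
  · simp [dayOf, hp]
  · have hs : 1 ≤ s := by simp only [okP] at h; omega
    have hb := dayOf_bounds hp hs
    nlinarith [hb.2]

lemma pop_iff {p s e : Int} (h : okP (p, s)) (he : 0 ≤ e) :
    (100 ≤ p + e * s) ↔ dayOf p s ≤ e := by
  by_cases hp : 100 ≤ p
  · have hs : 0 ≤ s := by simp only [okP] at h; omega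
    simp only [dayOf, if_pos hp]
    constructor
    · intro _; exact he
    · intro _; nlinarith [mul_nonneg he hs]
  · have hs : 1 ≤ s := by simp only [okP] at h; omega
    have hb := dayOf_bounds hp hs
    constructor
    · intro hge
      nlinarith [hb.1]
    · intro hle
      nlinarith [hb.2]

lemma dayOf_le {p s : Int} (h : okP (p, s)) : dayOf p s ≤ ((100 - p).toNat : Int) := by
  by_cases hp : 100 ≤ p
  · simp [dayOf, hp]
  · have hs : 1 ≤ s := by simp only [okP] at h; omega
    have hb := dayOf_bounds hp hs
    have h0 : 0 ≤ dayOf p s := dayOf_nonneg (Or.inl hs)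
    have ht : ((100 - p).toNat : Int) = 100 - p := Int.toNat_of_nonneg (by omega)
    rw [ht]
    nlinarith [hb.1]

lemma aPop_map (e : Int) (he : 0 ≤ e) :
    ∀ (ts : List (Int × Int)), (∀ t ∈ ts, okP t) →
    aPop (ts.map (fun t => t.1 + e * t.2)) =
      ((ts.dropWhile (fun t => decide (dayOf t.1 t.2 ≤ e))).map (fun t => t.1 + e * t.2),
       (ts.takeWhile (fun t => decide (dayOf t.1 t.2 ≤ e))).length) := by
  intro ts hts
  induction ts with
  | nil => simp [aPop]
  | cons t rest ih =>
    have ht : okP (t.1, t.2) := hts t (by simp)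
    have hrest := ih (fun x hx => hts x (List.mem_cons_of_mem _ hx))
    by_cases hd : dayOf t.1 t.2 ≤ e
    · have hpop : 100 ≤ t.1 + e * t.2 := (pop_iff ht he).mpr hd
      simp [aPop, hd, hpop, hrest]
    · have hpop : ¬ 100 ≤ t.1 + e * t.2 := fun hc => hd ((pop_iff ht he).mp hc)
      simp [aPop, hd, hpop]

lemma inc_map (speeds : List Int) (idx : Nat) (e : Int) (ts : List (Int × Int))
    (halign : ∀ i (h : i < ts.length), speeds.getD (idx + i) 0 = ts[i].2) :
    ((ts.map (fun t => t.1 + e * t.2)).zipIdx).map (fun t => t.1 + speeds.getD (idx + t.2) 0)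
      = ts.map (fun t => t.1 + (e + 1) * t.2) := by
  apply List.ext_getElem
  · simp
  · intro i h1 h2
    have hi : i < ts.length := by simpa using h2
    simp [List.getElem_zipIdx]
    rw [← List.getD_eq_getElem?_getD, halign i hi]
    ring

lemma day_le_maxDay {ts : List (Int × Int)} {t : Int × Int} (h : t ∈ ts) :
    dayOf t.1 t.2 ≤ maxDay ts := by
  induction ts with
  | nil => cases h
  | cons u rest ih =>
    simp only [maxDay, days, List.map_cons, List.foldr_cons]
    rcases List.mem_cons.mp h with rfl | hm
    · exact le_max_left _ _
    · exact le_max_of_le_right (ih hm)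

lemma maxDay_dropWhile_le (p : Int × Int → Bool) (ts : List (Int × Int)) :
    maxDay (ts.dropWhile p) ≤ maxDay ts := by
  induction ts with
  | nil => simp
  | cons t rest ih =>
    rw [List.dropWhile_cons]
    by_cases hp : p t = true
    · simp only [hp, if_true]
      refine le_trans ih ?_
      simp only [maxDay, days, List.map_cons, List.foldr_cons]
      exact le_max_right _ _
    · simp [hp]

lemma head_dropWhile_false {α : Type} (p : α → Bool) :
    ∀ (l : List α) (h : α), (l.dropWhile p).head? = some h → p h = false
  | [], h => by simp
  | x :: xs, h => by
    rw [List.dropWhile_cons]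
    by_cases hx : p x = true
    · simp only [hx, if_true]
      exact head_dropWhile_false p xs h
    · simp only [hx, Bool.false_eq_true, if_false]
      intro hh
      cases hh
      simpa using hx

lemma aStep_eq (speeds : List Int) :
    ∀ (fuel : Nat) (ts : List (Int × Int)) (e : Int) (idx : Nat) (res : List Int),
    (∀ t ∈ ts, okP t) →
    (∀ i (h : i < ts.length), speeds.getD (idx + i) 0 = ts[i].2) →
    0 ≤ e →
    (∀ t0, ts.head? = some t0 → e ≤ dayOf t0.1 t0.2) →
    maxDay ts - e + 2 ≤ (fuel : Int) →
    aStep speeds fuel (ts.map (fun t => t.1 + e * t.2)) idx res = res ++ groups (days ts) := by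
  intro fuel
  induction fuel with
  | zero =>
    intro ts e idx res hok halign he hhead hfuel
    cases ts with
    | nil => simp [aStep, days, groups]
    | cons t rest =>
      exfalso
      have h1 : e ≤ dayOf t.1 t.2 := hhead t rfl
      have h2 : dayOf t.1 t.2 ≤ maxDay (t :: rest) := day_le_maxDay (by simp)
      simp only [Nat.cast_zero] at hfuel
      omega
  | succ fuel ih =>
    intro ts e idx res hok halign he hhead hfuel
    cases ts with
    | nil => simp [aStep, days, groups]
    | cons t rest =>
      have hpop := aPop_map e he (t :: rest) hok
      have ht : okP t := hok t (by simp)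
      by_cases hd : dayOf t.1 t.2 ≤ e
      -- pop case: e = dayOf t (the head was not poppable before, now it is)
      · have he' : e = dayOf t.1 t.2 := le_antisymm (hhead t rfl) hd
        set pr := fun u : Int × Int => decide (dayOf u.1 u.2 ≤ e) with hpr
        have hpt : pr t = true := by simpa [hpr] using hd
        have htw : (t :: rest).takeWhile pr = t :: rest.takeWhile pr := by
          rw [List.takeWhile_cons, if_pos hpt]
        have hdw : (t :: rest).dropWhile pr = rest.dropWhile pr := by
          rw [List.dropWhile_cons, if_pos hpt]
        set k := ((t :: rest).takeWhile pr).length with hk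
        set rest' := rest.dropWhile pr with hrest'
        have hk1 : 1 ≤ k := by rw [hk, htw]; simp
        have hsplit : (t :: rest).takeWhile pr ++ rest' = t :: rest := by
          rw [← hdw]; exact List.takeWhile_append_dropWhile
        rw [hdw] at hpop
        -- alignment for the remaining suffix
        have halign' : ∀ i (h : i < rest'.length), speeds.getD (idx + k + i) 0 = rest'[i].2 := by
          intro i hi
          have hidx : k + i < (t :: rest).length := by
            conv_rhs => rw [← hsplit]
            simp only [List.length_append, ← hk]
            omega
          have hget : (t :: rest)[k + i]'hidx = rest'[i]'hi := by
            have h2 : ((t :: rest).takeWhile pr ++ rest')[k + i]'(by rw [hsplit]; exact hidx)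
                = rest'[i]'hi := by
              rw [List.getElem_append_right (by omega)]
              congr 1
              omega
            rw [← h2]
            congr 1
            rw [hsplit]
          rw [Nat.add_assoc, halign (k + i) hidx, hget]
        have hok' : ∀ u ∈ rest', okP u := fun u hu =>
          hok u (List.mem_cons_of_mem _ ((List.dropWhile_sublist _).subset hu))
        have hhead' : ∀ t0, rest'.head? = some t0 → e + 1 ≤ dayOf t0.1 t0.2 := by
          intro t0 h0
          have hf := head_dropWhile_false pr rest t0 h0
          simp only [hpr, decide_eq_false_iff_not, not_le] at hf
          omega
        have hmr : maxDay rest ≤ maxDay (t :: rest) := by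
          simp only [maxDay, days, List.map_cons, List.foldr_cons]
          exact le_max_right _ _
        have hfuel' : maxDay rest' - (e + 1) + 2 ≤ (fuel : Int) := by
          have hmd := maxDay_dropWhile_le pr rest
          rw [← hrest'] at hmd
          push_cast at hfuel
          omega
        simp only [aStep]
        rw [if_neg (by simp)]
        simp only [hpop]
        rw [if_pos (by omega : 0 < k)]
        rw [inc_map speeds (idx + k) e rest' halign']
        rw [ih rest' (e + 1) (idx + k) (res ++ [(k : Int)]) hok' halign' (by omega) hhead' hfuel']
        -- res ++ [k] ++ groups (days rest') = res ++ groups (days (t :: rest))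
        have hgr : groups (days (t :: rest)) = (k : Int) :: groups (days rest') := by
          have hdays : days (t :: rest) = dayOf t.1 t.2 :: days rest := rfl
          rw [hdays, groups]
          have hq : (fun x : Int => decide (x ≤ dayOf t.1 t.2)) ∘ (fun u : Int × Int => dayOf u.1 u.2) = pr := by
            funext u
            simp [hpr, he']
          have h1 : (days rest).takeWhile (fun x : Int => decide (x ≤ dayOf t.1 t.2))
              = (rest.takeWhile pr).map (fun u => dayOf u.1 u.2) := by
            rw [days, List.takeWhile_map, hq]
          have h2 : (days rest).dropWhile (fun x : Int => decide (x ≤ dayOf t.1 t.2))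
              = days rest' := by
            rw [days, List.dropWhile_map, hq, hrest', days]
          rw [h1, h2]
          have hlen : k = (rest.takeWhile pr).length + 1 := by rw [hk, htw]; simp
          congr 1
          simp only [List.length_map]
          push_cast [hlen]
          ring
        rw [hgr]
        simp
      -- waiting case: nothing pops, everything advances one day
      · have hpt : (fun u : Int × Int => decide (dayOf u.1 u.2 ≤ e)) t = false := by
          simpa using hd
        have htw : ((t :: rest).takeWhile (fun u : Int × Int => decide (dayOf u.1 u.2 ≤ e))) = [] := by
          rw [List.takeWhile_cons, if_neg (by simp [hpt])]
        have hdw : ((t :: rest).dropWhile (fun u : Int × Int => decide (dayOf u.1 u.2 ≤ e))) = t :: rest := by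
          rw [List.dropWhile_cons, if_neg (by simp [hpt])]
        rw [htw, hdw] at hpop
        simp only [aStep]
        rw [if_neg (by simp)]
        simp only [hpop, List.length_nil, Nat.add_zero, lt_irrefl]
        rw [inc_map speeds idx e (t :: rest) halign]
        apply ih (t :: rest) (e + 1) idx res hok halign (by omega)
        · intro t0 h0
          cases h0
          omega
        · have h2 : dayOf t.1 t.2 ≤ maxDay (t :: rest) := day_le_maxDay (by simp)
          push_cast at hfuel ⊢
          omega

-- B side: bGo over day lists
def bAbs : List Int → Int → Int → List Int → List Int
  | [], _, cnt, res => if 0 < cnt then res ++ [cnt] else res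
  | d :: ds, cur, cnt, res =>
    if cur < d then bAbs ds d 1 (if 0 < cnt then res ++ [cnt] else res)
    else bAbs ds cur (cnt + 1) res

lemma bGo_eq_bAbs (speeds : List Int) :
    ∀ (L : List (Int × Nat)) (cur cnt : Int) (res : List Int),
    bGo speeds L cur cnt res
      = bAbs (L.map (fun t => dayOf t.1 (speeds.getD t.2 0))) cur cnt res := by
  intro L
  induction L with
  | nil => intro cur cnt res; rfl
  | cons t rest ih =>
    intro cur cnt res
    obtain ⟨p, i⟩ := t
    simp only [bGo, bAbs, List.map_cons]
    by_cases h : cur < dayOf p (speeds.getD i 0) <;> simp only [h, if_true, if_false] <;> simp [ih]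

lemma bAbs_run :
    ∀ (ds : List Int) (cur cnt : Int) (res : List Int), 1 ≤ cnt →
    bAbs ds cur cnt res
      = res ++ [cnt + ((ds.takeWhile (fun x => decide (x ≤ cur))).length : Int)]
          ++ groups (ds.dropWhile (fun x => decide (x ≤ cur))) := by
  intro ds
  induction ds with
  | nil =>
    intro cur cnt res hc
    simp only [bAbs, List.takeWhile_nil, List.dropWhile_nil, List.length_nil]
    rw [if_pos (by omega)]
    simp [groups]
  | cons d ds ih =>
    intro cur cnt res hc
    by_cases h : cur < d
    · have hp : (fun x : Int => decide (x ≤ cur)) d = false := by simp; omega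
      rw [List.takeWhile_cons, List.dropWhile_cons]
      simp only [hp, Bool.false_eq_true, if_false]
      simp only [bAbs, h, if_pos]
      rw [if_pos (by omega : (0:Int) < cnt)]
      rw [ih d 1 (res ++ [cnt]) (by omega)]
      rw [groups]
      simp
    · have hp : (fun x : Int => decide (x ≤ cur)) d = true := by simp; omega
      rw [List.takeWhile_cons, List.dropWhile_cons]
      simp only [hp, if_true]
      simp only [bAbs, h, if_false]
      rw [ih cur (cnt + 1) res (by omega)]
      simp only [List.length_cons]
      congr 2
      push_cast
      ring_nf

lemma bAbs_groups (ds : List Int) (h : ∀ d ∈ ds, 0 ≤ d) :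
    bAbs ds (-1) 0 [] = groups ds := by
  cases ds with
  | nil => simp [bAbs, groups]
  | cons d ds =>
    have hd : (-1 : Int) < d := by have := h d (by simp); omega
    simp only [bAbs, hd, if_true, lt_irrefl]
    rw [bAbs_run ds d 1 _ (by omega)]
    rw [groups]
    simp

lemma maxDay_le_sum : ∀ (ts : List (Int × Int)), (∀ t ∈ ts, okP t) →
    maxDay ts ≤ (((ts.map (fun t => (100 - t.1).toNat)).sum : Nat) : Int) := by
  intro ts
  induction ts with
  | nil => intro _; simp [maxDay, days]
  | cons t rest ih =>
    intro hok
    rw [show maxDay (t :: rest) = max (dayOf t.1 t.2) (maxDay rest) from rfl,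
      List.map_cons, List.sum_cons]
    apply max_le
    · refine le_trans (dayOf_le (hok t (by simp))) ?_
      exact_mod_cast Nat.le_add_right _ _
    · refine le_trans (ih (fun u hu => hok u (List.mem_cons_of_mem _ hu))) ?_
      exact_mod_cast Nat.le_add_left _ _

-- ===== VERDICT (by name: the statement is the Claim_ definition above) =====
theorem solution_spec : Claim_equal_solution := by
  intro p s _hdom hpre
  obtain ⟨hlen, hok0⟩ := hpre
  have hok : ∀ t ∈ p.zip s, okP t := fun t ht => hok0 t ht
  -- A side
  have hmap : (p.zip s).map (fun t => t.1 + 0 * t.2) = p := by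
    have h0 : (fun t : Int × Int => t.1 + 0 * t.2) = Prod.fst := by
      funext t
      show t.1 + 0 * t.2 = t.1
      ring
    rw [h0, List.map_fst_zip hlen]
  have halign0 : ∀ i (h : i < (p.zip s).length), s.getD (0 + i) 0 = (p.zip s)[i].2 := by
    intro i hi
    have hi2 : i < s.length := by simp at hi; omega
    rw [Nat.zero_add, List.getD_eq_getElem _ _ hi2]
    simp [List.getElem_zip]
  have hhead0 : ∀ t0, (p.zip s).head? = some t0 → (0:Int) ≤ dayOf t0.1 t0.2 := by
    intro t0 h0
    exact dayOf_nonneg (hok t0 (List.mem_of_mem_head? h0))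
  have hsums : (p.zip s).map (fun t => (100 - t.1).toNat) = p.map (fun x => (100 - x).toNat) := by
    rw [show (fun t : Int × Int => (100 - t.1).toNat) = (fun x : Int => (100 - x).toNat) ∘ Prod.fst from rfl,
      ← List.map_map, List.map_fst_zip hlen]
  have hfuel0 : maxDay (p.zip s) - 0 + 2 ≤ (((p.map (fun x => (100 - x).toNat)).sum + 2 : Nat) : Int) := by
    have h1 := maxDay_le_sum (p.zip s) hok
    rw [hsums] at h1
    push_cast at h1 ⊢
    omega
  have hA : solution p s = [] ++ groups (days (p.zip s)) := by
    have h := aStep_eq s ((p.map (fun x => (100 - x).toNat)).sum + 2) (p.zip s) 0 0 []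
      hok halign0 le_rfl hhead0 hfuel0
    rw [hmap] at h
    rw [solution]
    exact h
  -- B side
  have hdl : p.zipIdx.map (fun t => dayOf t.1 (s.getD t.2 0)) = days (p.zip s) := by
    apply List.ext_getElem
    · simp [days]
      omega
    · intro i h1 h2
      have hip : i < p.length := by simpa using h1
      have his : i < s.length := by omega
      simp [days, List.getElem_zipIdx, List.getElem_zip, List.getElem?_eq_getElem his]
  have hdpos : ∀ d ∈ days (p.zip s), (0:Int) ≤ d := by
    intro d hd
    rw [days] at hd
    obtain ⟨t, ht, rfl⟩ := List.mem_map.mp hd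
    exact dayOf_nonneg (hok t ht)
  have hB : solution_alt p s = groups (days (p.zip s)) := by
    rw [solution_alt, bGo_eq_bAbs s p.zipIdx (-1) 0 [], hdl]
    exact bAbs_groups _ hdpos
  show solution p s = solution_alt p s
  rw [hA, hB]
  simp
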